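-- pv_equiv track=rewrite | github.com/NIB-SI/PhasiHunter | bin/integrationFunction.py | SplitIsland1
-- ===== SOURCE A (Python) =====
-- from collections import defaultdict
--
-- def nestedDic():
--     return defaultdict(nestedDic)
--
-- def SplitIsland1(candidate_cluster0, phase_length=21):
--     candidate_cluster = nestedDic()
--     parent_order = 1
--     for i in candidate_cluster0:
--         dic = [[]]
--         order = 0
--         object = (dic, order, candidate_cluster0[i])
--         out_list = literation_func(object)
--         for j in out_list:
--             if len(j) != 0:
--                 candidate_cluster[parent_order] = j
--                 parent_order += 1
--
--     return candidate_cluster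
--
-- def literation_func(lists, phase_length=21):
--     if phase_length == 21:
--         candidate_list = [0, 2, 19]
--     elif phase_length == 24:
--         candidate_list = [0, 2, 19]
--     dic = lists[0]
--     order = lists[1]
--     list = lists[2]
--     left_list = []
--     if len(list) != 0:
--         former  = list[0]
--     else:
--         return dic
--
--
--     for i in list:
--         test = (i - former) % phase_length
--         if test in candidate_list:
--             dic[order].append(i)
--             former = i
--         else:
--             left_list.append(i)
--     order += 1
--     dic.append([])
--
--     litetation_object = (dic, order, left_list)
--     return literation_func(litetation_object, phase_length)
-- ===== SOURCE B (Python) =====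
-- def SplitIsland1(candidate_cluster0, phase_length=21):
--     # Single left-to-right pass per cluster: each value is appended to the FIRST
--     # open chain whose last element it phase-matches ((x - last) % 21 in {0, 2, 19}),
--     # otherwise it opens a new chain.  This first-fit chaining yields exactly the
--     # groups A's repeated peeling passes produce, without rescanning leftovers.
--     result = {}
--     parent_order = 1
--     for key in candidate_cluster0:
--         groups = []
--         for x in candidate_cluster0[key]:
--             for g in groups:
--                 if (x - g[-1]) % 21 in (0, 2, 19):
--                     g.append(x)
--                     break
--             else:
--                 groups.append([x])
--         for g in groups:
--             result[parent_order] = g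
--             parent_order += 1
--     return result
-- ===== Notes on version B (the rewrite author's own statement) =====
-- stated objective: faster
-- what changed: Replaced A's recursive multi-pass peeling (literation_func repeatedly rescans the leftovers, threading a (dic, order, left_list) tuple, appending empty slots and filtering them out) by a single left-to-right pass per cluster that appends each value to the first open chain whose last element it phase-matches, opening a new chain otherwise; first-fit chaining provably yields the same groups in the same order.
import Mathlib
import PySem

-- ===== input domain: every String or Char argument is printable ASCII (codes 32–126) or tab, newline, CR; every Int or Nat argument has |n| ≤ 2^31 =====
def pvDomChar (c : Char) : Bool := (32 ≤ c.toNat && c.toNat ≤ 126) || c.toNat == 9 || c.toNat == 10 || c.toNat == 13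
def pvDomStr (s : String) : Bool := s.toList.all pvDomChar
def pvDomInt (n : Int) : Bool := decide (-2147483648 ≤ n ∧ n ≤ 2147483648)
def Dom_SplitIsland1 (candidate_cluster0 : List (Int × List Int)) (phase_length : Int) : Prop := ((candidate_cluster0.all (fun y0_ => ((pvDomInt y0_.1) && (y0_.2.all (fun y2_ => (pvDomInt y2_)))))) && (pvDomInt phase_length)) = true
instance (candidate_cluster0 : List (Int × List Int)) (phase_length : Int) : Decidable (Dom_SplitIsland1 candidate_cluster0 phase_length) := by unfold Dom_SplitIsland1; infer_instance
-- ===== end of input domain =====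

-- B replaces A's recursive multi-pass peeling by a single first-fit pass per cluster
-- (each value joins the first open chain whose last element it phase-matches); same return value.


-- ===== PORT A =====
-- A always calls literation_func with its default phase_length=21 (SplitIsland1 never forwards
-- its own phase_length into the initial call), so candidate_list is always [0, 2, 19] and the
-- modulus is always 21.
-- one iteration of literation_func's for-loop: state (dic, former, left_list)
def SI1_stepA (order : Nat) (s : List (List Int) × Int × List Int) (i : Int) :
    List (List Int) × Int × List Int :=
  if PySem.Int.mod (i - s.2.1) 21 ∈ ([0, 2, 19] : List Int) then
    (s.1.set order ((s.1.getD order []) ++ [i]), i, s.2.2)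
  else
    (s.1, s.2.1, s.2.2 ++ [i])

-- termination: each pass puts list[0] into dic[order], so left_list is strictly shorter
theorem SI1_passA_le (order : Nat) : ∀ (xs : List Int) (d : List (List Int)) (fo : Int) (left : List Int),
    ((xs.foldl (SI1_stepA order) (d, fo, left)).2.2).length ≤ left.length + xs.length := by
  intro xs
  induction xs with
  | nil => intro d fo left; simp
  | cons x xs ih =>
    intro d fo left
    simp only [List.foldl_cons, SI1_stepA]
    split_ifs with h
    · have := ih (d.set order ((d.getD order []) ++ [x])) x left
      simpa using Nat.le_trans this (by omega)
    · have := ih d fo (left ++ [x])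
      simp at this ⊢
      omega

theorem SI1_passA_lt (order : Nat) (dic : List (List Int)) (f : Int) (rest : List Int) :
    (((f :: rest).foldl (SI1_stepA order) (dic, f, ([] : List Int))).2.2).length < (f :: rest).length := by
  have h0 : SI1_stepA order (dic, f, ([] : List Int)) f
      = (dic.set order ((dic.getD order []) ++ [f]), f, ([] : List Int)) := by
    simp [SI1_stepA]
  have := SI1_passA_le order rest (dic.set order ((dic.getD order []) ++ [f])) f []
  simp only [List.foldl_cons, h0]
  simp at this
  simp [this]

-- literation_func (dic, order, list); phase_length is always 21 on every call A makes
def litA (dic : List (List Int)) (order : Nat) (l : List Int) : List (List Int)  :=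
  match l with
  | [] => dic
  | f :: rest =>
    let st := (f :: rest).foldl (SI1_stepA order) (dic, f, ([] : List Int))
    litA (st.1 ++ [[]]) (order + 1) st.2.2
termination_by l.length
decreasing_by exact SI1_passA_lt order dic f rest

-- `if len(j) != 0: candidate_cluster[parent_order] = j; parent_order += 1`
def SI1_insStep (s : PySem.Dict Int (List Int) × Int) (j : List Int) : PySem.Dict Int (List Int) × Int :=
  if j.length ≠ 0 then (s.1.insert s.2 j, s.2 + 1) else s

def SplitIsland1 (candidate_cluster0 : List (Int × List Int)) (phase_length : Int) : List (Int × List Int) :=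
  let d := PySem.Dict.ofList candidate_cluster0
  let st := d.keys.foldl
    (fun (s : PySem.Dict Int (List Int) × Int) i =>
      (litA [[]] 0 (d.getD i [])).foldl SI1_insStep s)
    (PySem.Dict.empty, 1)
  st.1.items

-- ===== PORT B =====
-- `for g in groups: if (x - g[-1]) % 21 in (0, 2, 19): g.append(x); break  else: groups.append([x])`
def SI1_place (groups : List (List Int)) (x : Int) : List (List Int) :=
  match groups with
  | [] => [[x]]
  | g :: gs =>
    if PySem.Int.mod (x - g.getLastD 0) 21 ∈ ([0, 2, 19] : List Int) then
      (g ++ [x]) :: gs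
    else
      g :: SI1_place gs x

-- the inner single pass building the open chains of one cluster
def SI1_groups (xs : List Int) : List (List Int) :=
  xs.foldl SI1_place []

-- `result[parent_order] = g; parent_order += 1` (fresh increasing keys ⇒ plain append)
def SI1_appStep (s : List (Int × List Int) × Int) (g : List Int) : List (Int × List Int) × Int :=
  (s.1 ++ [(s.2, g)], s.2 + 1)

def SplitIsland1_alt (candidate_cluster0 : List (Int × List Int)) (phase_length : Int) : List (Int × List Int) :=
  let d := PySem.Dict.ofList candidate_cluster0
  let st := d.keys.foldl
    (fun (s : List (Int × List Int) × Int) k =>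
      (SI1_groups (d.getD k [])).foldl SI1_appStep s)
    (([] : List (Int × List Int)), 1)
  st.1

-- ===== PRECONDITION & SPEC =====
def Spec_SplitIsland1 (candidate_cluster0 : List (Int × List Int)) (phase_length : Int) (out : List (Int × List Int)) : Prop := out = SplitIsland1_alt candidate_cluster0 phase_length
instance (candidate_cluster0 : List (Int × List Int)) (phase_length : Int) (out : List (Int × List Int)) : Decidable (Spec_SplitIsland1 candidate_cluster0 phase_length out) := by unfold Spec_SplitIsland1; infer_instance

-- ===== CLAIM (what is proved, stated in full; the proofs are below) =====
def Claim_equal_SplitIsland1 : Prop := ∀ (candidate_cluster0 : List (Int × List Int)) (phase_length : Int), Dom_SplitIsland1 candidate_cluster0 phase_length → Spec_SplitIsland1 candidate_cluster0 phase_length (SplitIsland1 candidate_cluster0 phase_length)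

-- ===== LEMMAS AND PROOFS =====

-- proof-only abstraction of ONE peeling pass of A: state (current group, former, leftovers)
def SI1_stepP (s : List Int × Int × List Int) (x : Int) : List Int × Int × List Int :=
  if PySem.Int.mod (x - s.2.1) 21 ∈ ([0, 2, 19] : List Int) then
    (s.1 ++ [x], x, s.2.2)
  else
    (s.1, s.2.1, s.2.2 ++ [x])

theorem SI1_passP_le : ∀ (xs : List Int) (g : List Int) (fo : Int) (left : List Int),
    ((xs.foldl SI1_stepP (g, fo, left)).2.2).length ≤ left.length + xs.length := by
  intro xs
  induction xs with
  | nil => intro g fo left; simp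
  | cons x xs ih =>
    intro g fo left
    simp only [List.foldl_cons, SI1_stepP]
    split_ifs with h
    · have := ih (g ++ [x]) x left
      simpa using Nat.le_trans this (by omega)
    · have := ih g fo (left ++ [x])
      simp at this ⊢
      omega

theorem SI1_passP_lt (f : Int) (rest : List Int) :
    (((f :: rest).foldl SI1_stepP (([] : List Int), f, ([] : List Int))).2.2).length < (f :: rest).length := by
  have h0 : SI1_stepP (([] : List Int), f, ([] : List Int)) f = ([f], f, ([] : List Int)) := by
    simp [SI1_stepP]
  have := SI1_passP_le rest [f] f []
  simp only [List.foldl_cons, h0]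
  simp at this
  simp [this]

-- proof-only abstraction of A's peeling recursion (one nonempty group per pass)
def SI1_peel (remaining : List Int) : List (List Int) :=
  match remaining with
  | [] => []
  | f :: rest =>
    let st := (f :: rest).foldl SI1_stepP (([] : List Int), f, ([] : List Int))
    st.1 :: SI1_peel st.2.2
termination_by remaining.length
decreasing_by exact SI1_passP_lt f rest

-- the pass over `done ++ [acc]` writing at index done.length is the abstract pass on acc
theorem SI1_pass_corr (done : List (List Int)) :
    ∀ (xs : List Int) (acc : List Int) (fo : Int) (left : List Int),
      xs.foldl (SI1_stepA done.length) (done ++ [acc], fo, left)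
        = (done ++ [(xs.foldl SI1_stepP (acc, fo, left)).1],
           (xs.foldl SI1_stepP (acc, fo, left)).2.1,
           (xs.foldl SI1_stepP (acc, fo, left)).2.2) := by
  intro xs
  induction xs with
  | nil => intro acc fo left; simp
  | cons x xs ih =>
    intro acc fo left
    simp only [List.foldl_cons, SI1_stepA, SI1_stepP]
    split_ifs with h
    · have hget : (done ++ [acc]).getD done.length [] = acc := by
        simp [List.getD_eq_getElem?_getD]
      have hset : (done ++ [acc]).set done.length (acc ++ [x]) = done ++ [acc ++ [x]] := by
        simp
      rw [hget, hset, ih]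
    · exact ih acc fo (left ++ [x])

theorem litA_eq : ∀ (l : List Int) (done : List (List Int)),
    litA (done ++ [[]]) done.length l = done ++ (SI1_peel l ++ [[]]) := by
  intro l
  induction l using SI1_peel.induct with
  | case1 => intro done; rw [litA, SI1_peel]; simp
  | case2 f rest st ih =>
    intro done
    rw [litA, SI1_peel]
    show litA (((f :: rest).foldl (SI1_stepA done.length) (done ++ [[]], f, [])).1 ++ [[]]) (done.length + 1)
           ((f :: rest).foldl (SI1_stepA done.length) (done ++ [[]], f, [])).2.2 = _
    rw [SI1_pass_corr done (f :: rest) [] f []]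
    have := ih (done ++ [((f :: rest).foldl SI1_stepP ([], f, [])).1])
    simp only [List.length_append, List.length_cons, List.length_nil, List.append_assoc] at this ⊢
    exact this

theorem SI1_passP_acc_ne : ∀ (xs : List Int) (g : List Int) (fo : Int) (left : List Int),
    g ≠ [] → (xs.foldl SI1_stepP (g, fo, left)).1 ≠ [] := by
  intro xs
  induction xs with
  | nil => intro g fo left h; simpa using h
  | cons x xs ih =>
    intro g fo left h
    simp only [List.foldl_cons, SI1_stepP]
    split_ifs with hc
    · exact ih (g ++ [x]) x left (by simp)
    · exact ih g fo (left ++ [x]) h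

theorem SI1_peel_ne : ∀ (l : List Int), ∀ g ∈ SI1_peel l, g ≠ [] := by
  intro l
  induction l using SI1_peel.induct with
  | case1 => simp [SI1_peel]
  | case2 f rest st ih =>
    rw [SI1_peel]
    simp only [List.mem_cons]
    intro g hg
    rcases hg with hg | hg
    · subst hg
      have h0 : SI1_stepP (([] : List Int), f, ([] : List Int)) f = ([f], f, ([] : List Int)) := by
        simp [SI1_stepP]
      simp only [List.foldl_cons, h0]
      exact SI1_passP_acc_ne rest [f] f [] (by simp)
    · exact ih g hg

-- the leftovers accumulator of a pass only gets appended to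
theorem SI1_stepP_left : ∀ (xs : List Int) (g : List Int) (fo : Int) (l : List Int),
    xs.foldl SI1_stepP (g, fo, l)
      = ((xs.foldl SI1_stepP (g, fo, [])).1, (xs.foldl SI1_stepP (g, fo, [])).2.1,
         l ++ (xs.foldl SI1_stepP (g, fo, [])).2.2) := by
  intro xs
  induction xs with
  | nil => intro g fo l; simp
  | cons x xs ih =>
    intro g fo l
    simp only [List.foldl_cons, SI1_stepP]
    split_ifs with h
    · exact ih (g ++ [x]) x l
    · rw [ih g fo (l ++ [x]), ih g fo ([] ++ [x])]
      simp

-- first-fit placement over (g :: G) = one abstract pass on g, then placement of its leftovers over G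
theorem SI1_place_pass : ∀ (xs : List Int) (g : List Int) (G : List (List Int)) (fo : Int),
    g ≠ [] → fo = g.getLastD 0 →
    xs.foldl SI1_place (g :: G)
      = (xs.foldl SI1_stepP (g, fo, [])).1
        :: ((xs.foldl SI1_stepP (g, fo, [])).2.2).foldl SI1_place G := by
  intro xs
  induction xs with
  | nil => intro g G fo _ _; simp
  | cons x xs ih =>
    intro g G fo hne hfo
    subst hfo
    simp only [List.foldl_cons, SI1_place, SI1_stepP]
    split_ifs with h
    · have hlast : ((g ++ [x]).getLastD 0) = x := by simp
      have := ih (g ++ [x]) G x (by simp) hlast.symm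
      simpa using this
    · rw [SI1_stepP_left xs g (g.getLastD 0) ([] ++ [x])]
      simp only [List.nil_append, List.cons_append, List.foldl_cons]
      exact ih g (SI1_place G x) (g.getLastD 0) hne rfl

-- B's single first-fit pass produces exactly A's peeled groups
theorem SI1_groups_eq_peel : ∀ (l : List Int), SI1_groups l = SI1_peel l := by
  intro l
  induction l using SI1_peel.induct with
  | case1 => simp [SI1_groups, SI1_peel]
  | case2 f rest st ih =>
    have h0 : SI1_place ([] : List (List Int)) f = [[f]] := by simp [SI1_place]
    have h1 : SI1_stepP (([] : List Int), f, ([] : List Int)) f = ([f], f, ([] : List Int)) := by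
      simp [SI1_stepP]
    rw [SI1_peel]
    show SI1_groups (f :: rest) = st.1 :: SI1_peel st.2.2
    rw [← ih]
    show (f :: rest).foldl SI1_place [] = st.1 :: (st.2.2).foldl SI1_place []
    have hst : st = rest.foldl SI1_stepP ([f], f, ([] : List Int)) := by
      show (f :: rest).foldl SI1_stepP (([] : List Int), f, ([] : List Int)) = _
      simp only [List.foldl_cons, h1]
    rw [hst]
    simp only [List.foldl_cons, h0]
    exact SI1_place_pass rest [f] [] f (by simp) (by simp)

-- inner fold: inserting fresh increasing keys appends
theorem SI1_inner_corr : ∀ (gs : List (List Int)) (acc : PySem.Dict Int (List Int)) (n : Int),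
    (∀ p ∈ acc.items, p.1 < n) → (∀ g ∈ gs, g ≠ []) →
    (gs.foldl SI1_insStep (acc, n)).1.items = (gs.foldl SI1_appStep (acc.items, n)).1
    ∧ (gs.foldl SI1_insStep (acc, n)).2 = (gs.foldl SI1_appStep (acc.items, n)).2
    ∧ (∀ p ∈ (gs.foldl SI1_insStep (acc, n)).1.items, p.1 < (gs.foldl SI1_insStep (acc, n)).2) := by
  intro gs
  induction gs with
  | nil => intro acc n hinv _; exact ⟨rfl, rfl, hinv⟩
  | cons g gs ih =>
    intro acc n hinv hne
    have hglen : g.length ≠ 0 := by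
      have := hne g (by simp)
      simpa [List.length_eq_zero_iff] using this
    have hcont : acc.contains n = false := by
      rw [PySem.Dict.contains_eq_decide_mem_keys]
      simp only [decide_eq_false_iff_not, PySem.Dict.keys, List.mem_map]
      rintro ⟨p, hp, rfl⟩
      exact absurd (hinv p hp) (lt_irrefl _)
    have hitems : (acc.insert n g).items = acc.items ++ [(n, g)] :=
      PySem.Dict.items_insert_of_not_contains _ _ hcont
    have hstep : SI1_insStep (acc, n) g = (acc.insert n g, n + 1) := by
      simp [SI1_insStep, hglen]
    have hinv' : ∀ p ∈ (acc.insert n g).items, p.1 < n + 1 := by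
      intro p hp
      rw [hitems] at hp
      rcases List.mem_append.mp hp with hp | hp
      · exact lt_trans (hinv p hp) (by omega)
      · simp at hp; subst hp; omega
    have := ih (acc.insert n g) (n + 1) hinv' (fun g' hg' => hne g' (by simp [hg']))
    simpa [List.foldl_cons, hstep, SI1_appStep, hitems] using this

-- outer fold over the clusters
theorem SI1_outer_corr (get : Int → List Int) : ∀ (ks : List Int) (acc : PySem.Dict Int (List Int)) (n : Int),
    (∀ p ∈ acc.items, p.1 < n) →
    (ks.foldl (fun s i => (litA [[]] 0 (get i)).foldl SI1_insStep s) (acc, n)).1.items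
      = (ks.foldl (fun s k => (SI1_peel (get k)).foldl SI1_appStep s) (acc.items, n)).1
    ∧ (ks.foldl (fun s i => (litA [[]] 0 (get i)).foldl SI1_insStep s) (acc, n)).2
      = (ks.foldl (fun s k => (SI1_peel (get k)).foldl SI1_appStep s) (acc.items, n)).2
    ∧ (∀ p ∈ (ks.foldl (fun s i => (litA [[]] 0 (get i)).foldl SI1_insStep s) (acc, n)).1.items,
        p.1 < (ks.foldl (fun s i => (litA [[]] 0 (get i)).foldl SI1_insStep s) (acc, n)).2) := by
  intro ks
  induction ks with
  | nil => intro acc n hinv; exact ⟨rfl, rfl, hinv⟩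
  | cons k ks ih =>
    intro acc n hinv
    have hlit : litA [[]] 0 (get k) = SI1_peel (get k) ++ [[]] := by
      have := litA_eq (get k) []
      simpa using this
    have hfold : (litA [[]] 0 (get k)).foldl SI1_insStep (acc, n)
        = (SI1_peel (get k)).foldl SI1_insStep (acc, n) := by
      rw [hlit, List.foldl_append]
      simp [SI1_insStep]
    obtain ⟨h1, h2, h3⟩ := SI1_inner_corr (SI1_peel (get k)) acc n hinv (SI1_peel_ne _)
    have hstB : (SI1_peel (get k)).foldl SI1_appStep (acc.items, n)
        = (((SI1_peel (get k)).foldl SI1_insStep (acc, n)).1.items,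
           ((SI1_peel (get k)).foldl SI1_insStep (acc, n)).2) :=
      Prod.ext h1.symm h2.symm
    simp only [List.foldl_cons, hfold, hstB]
    exact ih _ _ h3

-- ===== VERDICT (by name: the statement is the Claim_ definition above) =====
theorem SplitIsland1_spec : Claim_equal_SplitIsland1 := by
  intro cc0 pl _
  unfold Spec_SplitIsland1 SplitIsland1 SplitIsland1_alt
  simp only [SI1_groups_eq_peel]
  have hempty : ∀ p ∈ (PySem.Dict.empty : PySem.Dict Int (List Int)).items, p.1 < (1 : Int) := by
    intro p hp; simp [PySem.Dict.empty] at hp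
  have := SI1_outer_corr (fun i => (PySem.Dict.ofList cc0).getD i [])
            (PySem.Dict.ofList cc0).keys PySem.Dict.empty 1 hempty
  simpa using this.1
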